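-- pv_equiv track=rewrite | github.com/NahelMzg/AdventOfCOde | 1/AOC_D1_1.py | distanceBetweenLists
-- ===== SOURCE A (Python) =====
-- import copy
--
-- def findMax(L : list) :
--
--     n = len(L)
--     max = L[0]
--     for i in range(1, n) :
--         if L[i] > max :
--             max = L[i]
--
--     return min
--
-- def findMin(L : list) :
--
--     n = len(L)
--     min = L[0]
--     minIndex = 0
--     for i in range(1, n) :
--         if L[i] < min :
--             min = L[i]
--             minIndex = i
--     return min, minIndex
--
-- def orderList(L : list) :
--     orderedList = []
--     max = findMax(L)
--     copyL = copy.deepcopy(L)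
--     for i in range(0, len(L)) :
--         minAndMinIndex = findMin(copyL)
--
--         orderedList.append(minAndMinIndex[0])
--
--         copyL[ minAndMinIndex[1]] =  10000
--     return orderedList
--
-- def distanceBetweenLists(L1, L2) :
--     distances = []
--     orderedL1 = orderList(L1)
--     orderedL2 = orderList(L2)
--
--     for i in range(len(L1)):
--         distance = abs(orderedL1[i]- orderedL2[i])
--         distances.append(distance)
--
--     return distances
-- ===== SOURCE B (Python) =====
-- def distanceBetweenLists(L1, L2):
--     return [abs(a - b) for a, b in zip(sorted(L1), sorted(L2))]
-- ===== Notes on version B (the rewrite author's own statement) =====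
-- stated objective: faster
-- what changed: A selection-sorts each list in O(n^2) by repeatedly scanning for the minimum and overwriting it with the sentinel 10000; B simply sorts both lists with sorted() and zips them, taking absolute differences in one pass.
-- intended difference: On inputs containing a value greater than 10000, A's sentinel 10000 gets extracted in place of the larger real elements, so A returns distances computed from clamped values (e.g. A([5,10001],[1,2]) = [4, 9998]); B returns the true pairwise distances of the sorted lists ([4, 9999]), which is the intended result. — e.g. on distanceBetweenLists([5, 10001], [1, 2]): A returns [4, 9998], B returns [4, 9999]
import Mathlib
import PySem

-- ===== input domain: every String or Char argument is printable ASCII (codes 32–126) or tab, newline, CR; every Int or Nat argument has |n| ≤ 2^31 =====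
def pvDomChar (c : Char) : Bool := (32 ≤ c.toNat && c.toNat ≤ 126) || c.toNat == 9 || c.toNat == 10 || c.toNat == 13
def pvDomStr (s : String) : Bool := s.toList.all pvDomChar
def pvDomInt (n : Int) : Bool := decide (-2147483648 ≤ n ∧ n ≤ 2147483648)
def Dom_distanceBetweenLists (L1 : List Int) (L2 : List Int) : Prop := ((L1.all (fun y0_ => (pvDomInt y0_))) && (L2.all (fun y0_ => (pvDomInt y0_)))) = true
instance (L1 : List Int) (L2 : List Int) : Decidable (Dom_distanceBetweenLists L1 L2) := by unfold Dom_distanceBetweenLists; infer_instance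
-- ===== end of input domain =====

-- B replaces A's quadratic selection-sort-with-sentinel by sorted()+zip; equal return values
-- outside D_ (inputs with a value > 10000, where A's sentinel clamps and B is right).

-- ===== PORT A =====
-- Python's findMax loops over L but RETURNS the builtin `min` (a function object), and orderList
-- never uses that result; its only observable effect is an IndexError on an empty list (excluded
-- by Pre_), so it has no value-level port.
-- findMin: returns (min, minIndex); Python's L[0] raises IndexError on [] (outside Pre_).
def findMin (L : List Int) : Int × Int :=
  match L with
  | [] => (0, 0)   -- Python: L[0] raises IndexError here (outside Pre_)
  | h :: _ =>
    (PySem.List.pyRange 1 (L.length : Int) 1).foldl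
      (fun (st : Int × Int) i =>
        if PySem.List.pyGetD L i 0 < st.1 then (PySem.List.pyGetD L i 0, i) else st)
      (h, 0)

-- orderList: state is (orderedList, copyL); copy.deepcopy of a list of ints is a value copy.
def orderList (L : List Int) : List Int :=
  ((PySem.List.pyRange 0 (L.length : Int) 1).foldl
    (fun (st : List Int × List Int) _ =>
      let minAndMinIndex := findMin st.2
      (st.1 ++ [minAndMinIndex.1], PySem.List.pySetD st.2 minAndMinIndex.2 10000))
    ([], L)).1

def distanceBetweenLists (L1 : List Int) (L2 : List Int) : List Int :=
  let orderedL1 := orderList L1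
  let orderedL2 := orderList L2
  (PySem.List.pyRange 0 (L1.length : Int) 1).foldl
    (fun (distances : List Int) i =>
      distances ++ [|PySem.List.pyGetD orderedL1 i 0 - PySem.List.pyGetD orderedL2 i 0|])
    []

-- ===== PORT B =====
def distanceBetweenLists_alt (L1 : List Int) (L2 : List Int) : List Int :=
  ((PySem.List.sorted L1 (fun x => x) false).zip (PySem.List.sorted L2 (fun x => x) false)).map
    (fun p => |p.1 - p.2|)

-- ===== PRECONDITION & SPEC =====
-- Pre_ excludes exactly the inputs on which A raises IndexError: an empty L1 or L2 (L[0] in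
-- findMax/findMin), or len(L1) > len(L2) (orderedL2[i] out of range).
def Pre_distanceBetweenLists (L1 : List Int) (L2 : List Int) : Prop :=
  L1 ≠ [] ∧ L2 ≠ [] ∧ L1.length ≤ L2.length
instance (L1 : List Int) (L2 : List Int) : Decidable (Pre_distanceBetweenLists L1 L2) := by
  unfold Pre_distanceBetweenLists; infer_instance
def pvWitness_distanceBetweenLists : List Int × List Int := ([3, 1, 2], [7, 5, 100, 6])

-- On inputs containing a value greater than 10000, A's sentinel 10000 (written over each
-- extracted minimum) is itself extracted in place of the larger real elements, so A returns
-- distances computed from clamped values; B returns the true pairwise distances of the sorted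
-- lists, which is the intended result.
def D_distanceBetweenLists (L1 : List Int) (L2 : List Int) : Prop :=
  (∃ x ∈ L1, 10000 < x) ∨ (∃ x ∈ L2, 10000 < x)
instance (L1 : List Int) (L2 : List Int) : Decidable (D_distanceBetweenLists L1 L2) := by
  unfold D_distanceBetweenLists; infer_instance

def Spec_distanceBetweenLists (L1 : List Int) (L2 : List Int) (out : List Int) : Prop :=
  ¬ D_distanceBetweenLists L1 L2 → out = distanceBetweenLists_alt L1 L2
instance (L1 : List Int) (L2 : List Int) (out : List Int) : Decidable (Spec_distanceBetweenLists L1 L2 out) := by unfold Spec_distanceBetweenLists; infer_instance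

def pvDiffWitness_distanceBetweenLists : List Int × List Int := ([5, 10001], [1, 2])
def pvDiffWitnessOut_distanceBetweenLists : (List Int) × (List Int) := ([4, 9998], [4, 9999])

-- ===== CLAIM (what is proved, stated in full; the proofs are below) =====
def Claim_unchanged_distanceBetweenLists : Prop := ∀ (L1 : List Int) (L2 : List Int), Dom_distanceBetweenLists L1 L2 → Pre_distanceBetweenLists L1 L2 → Spec_distanceBetweenLists L1 L2 (distanceBetweenLists L1 L2)
def Claim_changed_distanceBetweenLists : Prop := Dom_distanceBetweenLists (pvDiffWitness_distanceBetweenLists.1) (pvDiffWitness_distanceBetweenLists.2) ∧ Pre_distanceBetweenLists (pvDiffWitness_distanceBetweenLists.1) (pvDiffWitness_distanceBetweenLists.2) ∧ D_distanceBetweenLists (pvDiffWitness_distanceBetweenLists.1) (pvDiffWitness_distanceBetweenLists.2) ∧ distanceBetweenLists (pvDiffWitness_distanceBetweenLists.1) (pvDiffWitness_distanceBetweenLists.2) = pvDiffWitnessOut_distanceBetweenLists.1 ∧ distanceBetweenLists_alt (pvDiffWitness_distanceBetweenLists.1) (pvDiffWitness_distanceBetweenLists.2) = pvDiffWitnessOut_distanceBetweenLists.2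 ∧ pvDiffWitnessOut_distanceBetweenLists.1 ≠ pvDiffWitnessOut_distanceBetweenLists.2
-- ===== LEMMAS AND PROOFS =====

-- invariant of findMin's fold: the running (min, minIndex) stays an in-range index holding the
-- running minimum, which only ever decreases and bounds every scanned element
theorem fmin_fold (L : List Int) (l : List Int) (st : Int × Int)
    (hl : ∀ i ∈ l, 0 ≤ i ∧ i < (L.length : Int))
    (h2 : 0 ≤ st.2) (h2' : st.2 < (L.length : Int))
    (hv : PySem.List.pyGetD L st.2 0 = st.1) :
    0 ≤ (l.foldl (fun (st : Int × Int) i =>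
        if PySem.List.pyGetD L i 0 < st.1 then (PySem.List.pyGetD L i 0, i) else st) st).2 ∧
    (l.foldl (fun (st : Int × Int) i =>
        if PySem.List.pyGetD L i 0 < st.1 then (PySem.List.pyGetD L i 0, i) else st) st).2 < (L.length : Int) ∧
    PySem.List.pyGetD L (l.foldl (fun (st : Int × Int) i =>
        if PySem.List.pyGetD L i 0 < st.1 then (PySem.List.pyGetD L i 0, i) else st) st).2 0
      = (l.foldl (fun (st : Int × Int) i =>
        if PySem.List.pyGetD L i 0 < st.1 then (PySem.List.pyGetD L i 0, i) else st) st).1 ∧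
    (l.foldl (fun (st : Int × Int) i =>
        if PySem.List.pyGetD L i 0 < st.1 then (PySem.List.pyGetD L i 0, i) else st) st).1 ≤ st.1 ∧
    ∀ i ∈ l, (l.foldl (fun (st : Int × Int) i =>
        if PySem.List.pyGetD L i 0 < st.1 then (PySem.List.pyGetD L i 0, i) else st) st).1
        ≤ PySem.List.pyGetD L i 0 := by
  induction l generalizing st with
  | nil => simpa using ⟨h2, h2', hv⟩
  | cons a t ih =>
    have ha := hl a (by simp)
    simp only [List.foldl_cons]
    by_cases hc : PySem.List.pyGetD L a 0 < st.1
    · simp only [if_pos hc]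
      obtain ⟨r1, r2, r3, r4, r5⟩ := ih (PySem.List.pyGetD L a 0, a)
        (fun i hi => hl i (by simp [hi])) ha.1 ha.2 rfl
      exact ⟨r1, r2, r3, le_trans r4 (le_of_lt hc), by
        intro i hi
        rcases List.mem_cons.mp hi with h | h
        · subst h; exact r4
        · exact r5 i h⟩
    · simp only [if_neg hc]
      obtain ⟨r1, r2, r3, r4, r5⟩ := ih st (fun i hi => hl i (by simp [hi])) h2 h2' hv
      exact ⟨r1, r2, r3, r4, by
        intro i hi
        rcases List.mem_cons.mp hi with h | h
        · subst h; exact le_trans r4 (not_lt.mp hc)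
        · exact r5 i h⟩

-- findMin on a nonempty list returns the minimum value together with an in-range index holding it
theorem findMin_spec (L : List Int) (hne : L ≠ []) :
    0 ≤ (findMin L).2 ∧ (findMin L).2 < (L.length : Int) ∧
      PySem.List.pyGetD L (findMin L).2 0 = (findMin L).1 ∧ ∀ y ∈ L, (findMin L).1 ≤ y := by
  obtain ⟨h, t, rfl⟩ := List.exists_cons_of_ne_nil hne
  have hlen : (0:Int) < ((h :: t).length : Int) := by exact_mod_cast t.length.succ_pos
  have hmain := fmin_fold (h :: t) (PySem.List.pyRange 1 ((h :: t).length : Int) 1) (h, 0)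
    (fun i hi => by
      have := PySem.List.mem_pyRange_one.mp hi
      exact ⟨by omega, this.2⟩)
    (by simp) hlen (by simp [PySem.List.pyGetD_zero_cons])
  simp only [findMin]
  obtain ⟨r1, r2, r3, r4, r5⟩ := hmain
  refine ⟨r1, r2, r3, ?_⟩
  intro y hy
  obtain ⟨k, hk, rfl⟩ := List.mem_iff_getElem.mp hy
  by_cases hk0 : k = 0
  · subst hk0; simpa using r4
  · have hmem : (k : Int) ∈ PySem.List.pyRange 1 ((h :: t).length : Int) 1 :=
      PySem.List.mem_pyRange_one.mpr ⟨by omega, by exact_mod_cast hk⟩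
    have := r5 (k : Int) hmem
    rw [PySem.List.pyGetD_natCast] at this
    rwa [List.getD_eq_getElem] at this

theorem findMin_fst_mem (xs : List Int) (hne : xs ≠ []) : (findMin xs).1 ∈ xs := by
  obtain ⟨r1, r2, r3, r4⟩ := findMin_spec xs hne
  rw [← r3]; exact PySem.List.pyGetD_mem xs 0 (by constructor <;> omega)

-- the extracted minimum is the head of sorted, the rest sorts to sorted of the erased list
theorem sorted_min_cons (c : List Int) (hne : c ≠ []) :
    PySem.List.sorted c (fun x => x) false
      = (findMin c).1 :: PySem.List.sorted (c.erase (findMin c).1) (fun x => x) false := by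
  obtain ⟨r1, r2, r3, r4⟩ := findMin_spec c hne
  have hmem : (findMin c).1 ∈ c := findMin_fst_mem c hne
  apply PySem.List.sorted_id_eq_of_perm_of_pairwise
  · exact ((PySem.List.sorted_perm _ _ _).cons _).trans (List.perm_cons_erase hmem).symm
  · apply List.pairwise_cons.mpr
    constructor
    · intro y hy
      exact r4 y (List.mem_of_mem_erase ((PySem.List.mem_sorted _ _ _ _).mp hy))
    · exact PySem.List.sorted_pairwise _ _

-- overwriting the found minimum with the sentinel is, up to permutation, erase + one sentinel
theorem perm_set_erase (xs : List Int) (hne : xs ≠ []) :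
    (PySem.List.pySetD xs (findMin xs).2 10000).Perm (10000 :: xs.erase (findMin xs).1) := by
  obtain ⟨r1, r2, r3, r4⟩ := findMin_spec xs hne
  rw [PySem.List.pySetD_of_nonneg _ _ r1]
  have hk : (findMin xs).2.toNat < xs.length := by omega
  have hget : xs[(findMin xs).2.toNat] = (findMin xs).1 := by
    rw [← PySem.List.pyGetD_eq_getElem xs 0 r1 r2, r3]
  have h1 : (xs.set (findMin xs).2.toNat 10000).Perm (10000 :: xs.eraseIdx (findMin xs).2.toNat) :=
    List.set_perm_cons_eraseIdx hk 10000
  have h2 : xs.Perm (xs[(findMin xs).2.toNat] :: xs.eraseIdx (findMin xs).2.toNat) := by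
    conv_lhs => rw [← List.take_append_drop (findMin xs).2.toNat xs, List.drop_eq_getElem_cons hk]
    rw [List.eraseIdx_eq_take_drop_succ]
    exact List.perm_middle
  rw [hget] at h2
  have hmem : (findMin xs).1 ∈ xs := findMin_fst_mem xs hne
  have h3 : (xs.eraseIdx (findMin xs).2.toNat).Perm (xs.erase (findMin xs).1) :=
    (h2.symm.trans (List.perm_cons_erase hmem)).cons_inv
  exact h1.trans (h3.cons 10000)

-- one selection step, seen through sorted: when every element is ≤ 10000 the sentinel sorts last
theorem sorted_step (xs : List Int) (hne : xs ≠ []) (h10 : ∀ x ∈ xs, x ≤ 10000) :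
    PySem.List.sorted (PySem.List.pySetD xs (findMin xs).2 10000) (fun x => x) false
      = PySem.List.sorted (xs.erase (findMin xs).1) (fun x => x) false ++ [10000] := by
  apply PySem.List.sorted_id_eq_of_perm_of_pairwise
  · have hmid := List.perm_middle (l₁ := xs.erase (findMin xs).1)
      (l₂ := ([] : List Int)) (a := (10000 : Int))
    rw [List.append_nil] at hmid
    exact (((PySem.List.sorted_perm _ _ _).append_right [10000]).trans hmid).trans
      (perm_set_erase xs hne).symm
  · rw [List.pairwise_append]
    refine ⟨PySem.List.sorted_pairwise _ _, by simp, ?_⟩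
    intro a ha b hb
    rw [List.mem_singleton] at hb
    subst hb
    exact h10 a (List.mem_of_mem_erase ((PySem.List.mem_sorted _ _ _ _).mp ha))

-- the loop body of orderList, as a function of the state
def olStep (st : List Int × List Int) : List Int × List Int :=
  let minAndMinIndex := findMin st.2
  (st.1 ++ [minAndMinIndex.1], PySem.List.pySetD st.2 minAndMinIndex.2 10000)

theorem olStep_iterate (k : Nat) : ∀ (acc xs : List Int), k ≤ xs.length → (∀ x ∈ xs, x ≤ 10000) →
    (olStep^[k] (acc, xs)).1 = acc ++ (PySem.List.sorted xs (fun x => x) false).take k := by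
  induction k with
  | zero => intro acc xs _ _; simp
  | succ k ih =>
    intro acc xs hk h10
    have hne : xs ≠ [] := by intro h; subst h; simp at hk
    have hmem : (findMin xs).1 ∈ xs := findMin_fst_mem xs hne
    obtain ⟨r1, r2, r3, r4⟩ := findMin_spec xs hne
    rw [Function.iterate_succ_apply]
    have hstep : olStep (acc, xs)
        = (acc ++ [(findMin xs).1], PySem.List.pySetD xs (findMin xs).2 10000) := rfl
    rw [hstep]
    have hlen' : (PySem.List.pySetD xs (findMin xs).2 10000).length = xs.length := by
      rw [PySem.List.pySetD_of_nonneg _ _ r1, List.length_set]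
    have h10' : ∀ x ∈ PySem.List.pySetD xs (findMin xs).2 10000, x ≤ 10000 := by
      intro x hx
      rw [PySem.List.pySetD_of_nonneg _ _ r1] at hx
      rcases List.mem_or_eq_of_mem_set hx with h | h
      · exact h10 x h
      · omega
    rw [ih (acc ++ [(findMin xs).1]) _ (by omega) h10']
    rw [sorted_step xs hne h10, sorted_min_cons xs hne]
    have hklen : k ≤ (PySem.List.sorted (xs.erase (findMin xs).1) (fun x => x) false).length := by
      rw [PySem.List.length_sorted, List.length_erase_of_mem hmem]
      omega
    rw [List.take_append_of_le_length hklen, List.take_succ_cons, List.append_assoc]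
    rfl

theorem orderList_eq_sorted (L : List Int) (h10 : ∀ x ∈ L, x ≤ 10000) :
    orderList L = PySem.List.sorted L (fun x => x) false := by
  unfold orderList
  have hfold : (PySem.List.pyRange 0 (L.length : Int) 1).foldl
      (fun (st : List Int × List Int) _ =>
        let minAndMinIndex := findMin st.2
        (st.1 ++ [minAndMinIndex.1], PySem.List.pySetD st.2 minAndMinIndex.2 10000))
      ([], L)
      = olStep^[(PySem.List.pyRange 0 (L.length : Int) 1).length] ([], L) :=
    List.foldl_const olStep ([], L) _
  rw [hfold]
  have hlen : (PySem.List.pyRange 0 (L.length : Int) 1).length = L.length := by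
    rw [PySem.List.length_pyRange_one]; omega
  rw [hlen, olStep_iterate L.length [] L le_rfl h10]
  rw [List.take_of_length_le (by rw [PySem.List.length_sorted]), List.nil_append]

theorem main_eq (L1 L2 : List Int)
    (hlen : L1.length ≤ L2.length) (h101 : ∀ x ∈ L1, x ≤ 10000) (h102 : ∀ x ∈ L2, x ≤ 10000) :
    distanceBetweenLists L1 L2 = distanceBetweenLists_alt L1 L2 := by
  unfold distanceBetweenLists distanceBetweenLists_alt
  rw [orderList_eq_sorted L1 h101, orderList_eq_sorted L2 h102,
    PySem.List.foldl_append_singleton_eq_map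
      (fun i => |PySem.List.pyGetD (PySem.List.sorted L1 (fun x => x) false) i 0
        - PySem.List.pyGetD (PySem.List.sorted L2 (fun x => x) false) i 0|),
    List.nil_append]
  apply List.ext_getElem
  · simp [PySem.List.length_pyRange_one]
    omega
  · intro k hk1 hk2
    have hkn : k < L1.length := by
      simpa [PySem.List.length_pyRange_one] using hk1
    have hk1' : k < (PySem.List.sorted L1 (fun x => x) false).length := by
      rw [PySem.List.length_sorted]; omega
    have hk2' : k < (PySem.List.sorted L2 (fun x => x) false).length := by
      rw [PySem.List.length_sorted]; omega
    rw [List.getElem_map, List.getElem_map, List.getElem_zip, PySem.List.getElem_pyRange_one]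
    simp only [zero_add]
    rw [PySem.List.pyGetD_eq_getElem _ _ (by positivity) (by exact_mod_cast hk1'),
        PySem.List.pyGetD_eq_getElem _ _ (by positivity) (by exact_mod_cast hk2')]
    simp

-- ===== VERDICT (by name: the statements are the Claim_ definitions above) =====
theorem distanceBetweenLists_spec : Claim_unchanged_distanceBetweenLists := by
  intro L1 L2 _ hpre
  obtain ⟨_, _, hlen⟩ := hpre
  unfold Spec_distanceBetweenLists
  intro hnD
  unfold D_distanceBetweenLists at hnD
  push_neg at hnD
  exact main_eq L1 L2 hlen (fun x hx => hnD.1 x hx) (fun x hx => hnD.2 x hx)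

theorem distanceBetweenLists_changed : Claim_changed_distanceBetweenLists := by
  unfold Claim_changed_distanceBetweenLists; decide
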